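-- pv_equiv track=rewrite | github.com/dannymcy/habitat-lab | habitat-lab/habitat/gpt/prompts/utils.py | extract_predicate_approval
-- ===== SOURCE A (Python) =====
-- def extract_predicate_approval(text):
--     """
--     Extract the 'yes/no' responses for tasks and reasons for tasks from the given text.
--     """
--     lines = text.split('\n')
--     tasks = []
--     reasons_tasks = []
--     is_reason_section_tasks = False
--
--     for line in lines:
--         line = line.strip()
--         if line.startswith("Tasks:"):
--             tasks = line.replace("Tasks:", "").strip().strip("[]").split(", ")
--         elif line.startswith("Reasons_tasks:"):
--             is_reason_section_tasks = True  # Start extracting reasons for tasks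
--         elif is_reason_section_tasks and line:
--             reasons_tasks.append(line.strip())
--
--     return tasks, reasons_tasks
-- ===== SOURCE B (Python) =====
-- def extract_predicate_approval(text):
--     """
--     Extract the 'yes/no' responses for tasks and reasons for tasks from the given text.
--     """
--     lines = [line.strip() for line in text.split('\n')]
--
--     tasks = []
--     for line in lines:
--         if line.startswith("Tasks:"):
--             tasks = line.replace("Tasks:", "").strip().strip("[]").split(", ")
--             break
--
--     reasons_tasks = []
--     for i, line in enumerate(lines):
--         if line.startswith("Reasons_tasks:"):
--             reasons_tasks = [line for line in lines[i + 1:] if line]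
--             break
--
--     return tasks, reasons_tasks
-- ===== Notes on version B (the rewrite author's own statement) =====
-- stated objective: simpler
-- what changed: Replaces the single stateful pass with a flag by two independent early-exit passes: a forward scan that parses the first 'Tasks:' line and a forward scan that finds the 'Reasons_tasks:' marker and keeps the non-empty lines after it; Pre_ excludes texts with repeated marker lines (a second 'Tasks:'/'Reasons_tasks:' line, or a 'Tasks:' line after the marker), where A's state-machine choice (last 'Tasks:' wins, later marker lines silently dropped from reasons) is accidental and either reading is defensible.
-- outside the precondition, e.g. on extract_predicate_approval('Tasks: [a]\nTasks: [b]'): A returns (['b'], []), B returns (['a'], [])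
import Mathlib
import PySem

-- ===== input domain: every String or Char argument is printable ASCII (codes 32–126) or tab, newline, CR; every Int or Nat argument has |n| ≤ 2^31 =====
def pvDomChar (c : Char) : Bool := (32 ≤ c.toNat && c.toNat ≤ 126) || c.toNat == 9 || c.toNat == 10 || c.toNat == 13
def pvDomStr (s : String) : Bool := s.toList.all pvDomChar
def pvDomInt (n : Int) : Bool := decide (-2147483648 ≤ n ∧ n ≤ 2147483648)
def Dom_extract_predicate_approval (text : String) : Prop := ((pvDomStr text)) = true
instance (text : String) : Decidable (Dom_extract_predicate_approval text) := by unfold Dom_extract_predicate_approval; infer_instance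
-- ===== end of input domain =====

-- B replaces A's single stateful pass (a flag deciding when reason lines collect) by two
-- independent early-exit passes: a forward scan parsing the first 'Tasks:' line and a forward
-- scan that finds the 'Reasons_tasks:' marker and keeps the non-empty lines after it; same O(n).

-- ===== PORT A =====
-- parse of a 'Tasks:' line: line.replace("Tasks:", "").strip().strip("[]").split(", ")
def pvParseTasks (line : String) : List String :=
  (PySem.Str.split? (PySem.Str.stripChars
      (PySem.Str.strip (PySem.Str.replace line "Tasks:" "")) "[]") ", ").getD []

-- the body of A's for-loop, over state (tasks, reasons_tasks, is_reason_section_tasks)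
def pvStepA (st : List String × List String × Bool) (line : String) :
    List String × List String × Bool :=
  let line := PySem.Str.strip line
  if PySem.Str.startswith line "Tasks:" = true then
    (pvParseTasks line, st.2.1, st.2.2)
  else if PySem.Str.startswith line "Reasons_tasks:" = true then
    (st.1, st.2.1, true)
  else if st.2.2 = true ∧ line ≠ "" then
    (st.1, st.2.1 ++ [PySem.Str.strip line], st.2.2)
  else st

def extract_predicate_approval (text : String) : List String × List String :=
  let lines := (PySem.Str.split? text "\n").getD []
  let st := lines.foldl pvStepA ([], [], false)
  (st.1, st.2.1)

-- ===== PORT B =====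
-- first loop of Source B: parse the first 'Tasks:' line (break)
def pvTasksFwd : List String → List String
  | [] => []
  | l :: ls =>
    if PySem.Str.startswith l "Tasks:" = true then pvParseTasks l else pvTasksFwd ls

-- second loop of Source B: find the 'Reasons_tasks:' marker, keep the non-empty lines after it (break)
def pvReasonsFwd : List String → List String
  | [] => []
  | l :: ls =>
    if PySem.Str.startswith l "Reasons_tasks:" = true then ls.filter (fun x => x != "")
    else pvReasonsFwd ls

def extract_predicate_approval_alt (text : String) : List String × List String :=
  let lines := ((PySem.Str.split? text "\n").getD []).map PySem.Str.strip
  (pvTasksFwd lines, pvReasonsFwd lines)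

-- ===== PRECONDITION & SPEC =====
-- Pre_ excludes texts with repeated marker lines (a second 'Tasks:' or 'Reasons_tasks:' line,
-- or a 'Tasks:' line after the 'Reasons_tasks:' marker): there A's state-machine choice
-- (last 'Tasks:' wins, later marker lines silently dropped from the reasons) is accidental
-- and either reading is defensible.
def Pre_extract_predicate_approval (text : String) : Prop :=
  let S := ((PySem.Str.split? text "\n").getD []).map PySem.Str.strip
  S.countP (fun l => PySem.Str.startswith l "Tasks:") ≤ 1 ∧
  S.countP (fun l => PySem.Str.startswith l "Reasons_tasks:") ≤ 1 ∧
  ((S.dropWhile (fun l => !PySem.Str.startswith l "Reasons_tasks:")).drop 1).all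
      (fun l => !PySem.Str.startswith l "Tasks:") = true
instance (text : String) : Decidable (Pre_extract_predicate_approval text) := by
  unfold Pre_extract_predicate_approval; infer_instance

def pvWitness_extract_predicate_approval : String :=
  "Tasks: [yes, no]\nReasons_tasks:\nreason one\n\nreason two"

def Spec_extract_predicate_approval (text : String) (out : List String × List String) : Prop := out = extract_predicate_approval_alt text
instance (text : String) (out : List String × List String) : Decidable (Spec_extract_predicate_approval text out) := by unfold Spec_extract_predicate_approval; infer_instance

-- ===== CLAIM (what is proved, stated in full; the proofs are below) =====
def Claim_equal_extract_predicate_approval : Prop := ∀ (text : String), Dom_extract_predicate_approval text → Pre_extract_predicate_approval text → Spec_extract_predicate_approval text (extract_predicate_approval text)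

-- ===== LEMMAS AND PROOFS =====

-- proof-only helpers: a characterization of A's fold as two scans over the stripped lines
def pvTasksRev : List String → List String
  | [] => []
  | l :: ls =>
    if PySem.Str.startswith l "Tasks:" = true then pvParseTasks l else pvTasksRev ls

def pvReasonKeep (x : String) : Bool :=
  x != "" && !PySem.Str.startswith x "Tasks:" && !PySem.Str.startswith x "Reasons_tasks:"

def pvReasonsScan : List String → List String
  | [] => []
  | l :: ls =>
    if PySem.Str.startswith l "Reasons_tasks:" = true then ls.filter pvReasonKeep
    else pvReasonsScan ls

lemma chars_strip_idem (l : List Char) :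
    PySem.Chars.strip (PySem.Chars.strip l) = PySem.Chars.strip l := by
  simp only [PySem.Chars.strip, PySem.Chars.lstrip, PySem.Chars.rstrip]
  set p := PySem.Chars.isspace
  set y := List.dropWhile p l with hy
  set z := (List.dropWhile p y.reverse).reverse with hz
  have hzy : z <+: y := by
    have h1 : List.dropWhile p y.reverse <:+ y.reverse := List.dropWhile_suffix p
    have h2 := h1.reverse
    rw [List.reverse_reverse] at h2
    exact hz ▸ h2
  have hdz : List.dropWhile p z = z := by
    cases hzexp : z with
    | nil => simp
    | cons a t =>
      have hay : y.head? = some a := by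
        rcases hzy with ⟨r, hr⟩
        rw [← hr, hzexp]; simp
      have hpa : p a = false := by
        have := List.dropWhile_idempotent (l := l) (p := p)
        rw [← hy] at this
        cases hyexp : y with
        | nil => simp [hyexp] at hay
        | cons b s =>
          rw [hyexp] at hay; simp at hay
          rw [hyexp] at this
          rw [List.dropWhile_cons] at this
          by_cases hb : p b = true
          · rw [if_pos hb] at this
            have := congrArg List.length this
            simp at this
            have := List.length_dropWhile_le p s
            omega
          · simp at hb; rw [hay] at hb; exact hb
      rw [List.dropWhile_cons, hpa]; simp
  rw [hdz, hz, List.reverse_reverse, List.dropWhile_idempotent]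

lemma str_strip_idem (s : String) :
    PySem.Str.strip (PySem.Str.strip s) = PySem.Str.strip s := by
  simp only [PySem.Str.strip, String.toList_ofList, chars_strip_idem]

lemma chars_not_both (cs : List Char) (h : PySem.Chars.startswith cs "Tasks:".toList = true) :
    PySem.Chars.startswith cs "Reasons_tasks:".toList = false := by
  rw [PySem.Chars.startswith_iff] at h
  by_contra hc
  simp only [Bool.not_eq_false] at hc
  rw [PySem.Chars.startswith_iff] at hc
  rcases h with ⟨t1, e1⟩
  rcases hc with ⟨t2, e2⟩
  rw [← e1] at e2
  have hT : "Tasks:".toList = ['T','a','s','k','s',':'] := by decide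
  have hR : "Reasons_tasks:".toList = ['R','e','a','s','o','n','s','_','t','a','s','k','s',':'] := by decide
  rw [hT, hR] at e2
  simp at e2

lemma reasonsScan_append (M : List String) (l : String) :
    pvReasonsScan (M ++ [l]) = pvReasonsScan M ++
      (if (M.any (fun x => PySem.Str.startswith x "Reasons_tasks:") && pvReasonKeep l) = true
       then [l] else []) := by
  induction M with
  | nil =>
    by_cases h : PySem.Str.startswith l "Reasons_tasks:" = true
    · simp [pvReasonsScan]
    · simp [pvReasonsScan]
  | cons a t ih =>
    by_cases h : PySem.Str.startswith a "Reasons_tasks:" = true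
    · simp only [List.cons_append, pvReasonsScan, List.filter_append,
        List.any_cons, h, Bool.true_or]
      cases hk : pvReasonKeep l <;> simp [List.filter, hk]
    · simp only [List.cons_append, pvReasonsScan, if_neg h, ih, List.any_cons]
      have h2 : PySem.Str.startswith a "Reasons_tasks:" = false := by
        revert h; cases PySem.Str.startswith a "Reasons_tasks:" <;> simp
      simp only [h2, Bool.false_or]

lemma loop_eq (L : List String) :
    L.foldl pvStepA ([], [], false)
      = (pvTasksRev (L.map PySem.Str.strip).reverse,
         pvReasonsScan (L.map PySem.Str.strip),
         (L.map PySem.Str.strip).any (fun l => PySem.Str.startswith l "Reasons_tasks:")) := by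
  induction L using List.reverseRecOn with
  | nil => rfl
  | append_singleton M l ih =>
    rw [List.foldl_append, List.foldl_cons, List.foldl_nil, ih, List.map_append,
      List.map_singleton, List.reverse_append, reasonsScan_append, List.any_append]
    simp only [List.reverse_singleton, List.singleton_append, List.any_cons, List.any_nil,
      Bool.or_false, pvStepA, pvTasksRev, pvReasonKeep, PySem.Str.startswith_eq]
    set S := M.map PySem.Str.strip
    set l' := PySem.Str.strip l with hl'
    have hss : PySem.Str.strip l' = l' := by rw [hl']; exact str_strip_idem l
    by_cases hT : PySem.Chars.startswith l'.toList "Tasks:".toList = true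
    · have hR := chars_not_both l'.toList hT
      simp only [hT, hR]
      simp
    · simp only [Bool.not_eq_true] at hT
      simp only [hT]
      by_cases hB : PySem.Chars.startswith l'.toList "Reasons_tasks:".toList = true
      · simp only [hB]
        simp
      · simp only [Bool.not_eq_true] at hB
        simp only [hB]
        by_cases hb : (S.any fun x => PySem.Chars.startswith x.toList "Reasons_tasks:".toList) = true ∧ l' ≠ ""
        · simp only [hb.1, hss]
          simp [hb.2]
        · rcases not_and_or.mp hb with h | h
          · simp only [Bool.not_eq_true] at h
            simp only [h]
            simp
          · simp only [not_not] at h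
            simp [h]

lemma pvTL : "Tasks:".toList = ['T','a','s','k','s',':'] := by decide
lemma pvRL : "Reasons_tasks:".toList
    = ['R','e','a','s','o','n','s','_','t','a','s','k','s',':'] := by decide

-- with at most one 'Tasks:' line, the last-match and first-match scans coincide
lemma tasksRev_skip (l m : List String)
    (h : ∀ x ∈ l, PySem.Chars.startswith x.toList ['T','a','s','k','s',':'] = false) :
    pvTasksRev (l ++ m) = pvTasksRev m := by
  induction l with
  | nil => rfl
  | cons b s ih =>
    simp only [List.cons_append, pvTasksRev, PySem.Str.startswith_eq, pvTL, h b (by simp)]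
    rw [if_neg (by simp)]
    exact ih (fun x hx => h x (by simp [hx]))

lemma tasksRev_drop_last (l : List String) (a : String)
    (ha : PySem.Chars.startswith a.toList ['T','a','s','k','s',':'] = false) :
    pvTasksRev (l ++ [a]) = pvTasksRev l := by
  induction l with
  | nil =>
    simp only [List.nil_append, pvTasksRev, PySem.Str.startswith_eq, pvTL, ha]
    rw [if_neg (by simp)]
  | cons b s ih =>
    simp only [List.cons_append, pvTasksRev, PySem.Str.startswith_eq, pvTL]
    by_cases hb : PySem.Chars.startswith b.toList ['T','a','s','k','s',':'] = true
    · simp [hb]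
    · rw [if_neg hb, if_neg hb, ih]

lemma tasks_eq (S : List String)
    (h : S.countP (fun l => PySem.Str.startswith l "Tasks:") ≤ 1) :
    pvTasksRev S.reverse = pvTasksFwd S := by
  simp only [PySem.Str.startswith_eq, pvTL] at h
  induction S with
  | nil => rfl
  | cons a t ih =>
    rw [List.countP_cons] at h
    by_cases ha : PySem.Chars.startswith a.toList ['T','a','s','k','s',':'] = true
    · have ht : t.countP (fun l => PySem.Chars.startswith l.toList ['T','a','s','k','s',':']) = 0 := by
        rw [ha] at h; rw [if_pos rfl] at h; omega
      have hnone : ∀ x ∈ t.reverse,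
          PySem.Chars.startswith x.toList ['T','a','s','k','s',':'] = false := by
        intro x hx
        simpa using List.countP_eq_zero.mp ht x (List.mem_reverse.mp hx)
      simp only [pvTasksFwd, PySem.Str.startswith_eq, pvTL, if_pos ha, List.reverse_cons]
      rw [tasksRev_skip _ _ hnone]
      simp only [pvTasksRev, PySem.Str.startswith_eq, pvTL, if_pos ha]
    · have ht : t.countP (fun l => PySem.Chars.startswith l.toList ['T','a','s','k','s',':']) ≤ 1 := by
        simp only [ha] at h; omega
      have ha' : PySem.Chars.startswith a.toList ['T','a','s','k','s',':'] = false := by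
        revert ha; cases PySem.Chars.startswith a.toList ['T','a','s','k','s',':'] <;> simp
      simp only [pvTasksFwd, PySem.Str.startswith_eq, pvTL, if_neg ha, List.reverse_cons]
      rw [tasksRev_drop_last _ _ ha']
      exact ih ht

-- with no later marker lines, A's filtered reason scan equals B's non-empty filter
lemma reasons_eq (S : List String)
    (h1 : S.countP (fun l => PySem.Str.startswith l "Reasons_tasks:") ≤ 1)
    (h2 : ((S.dropWhile (fun l => !PySem.Str.startswith l "Reasons_tasks:")).drop 1).all
        (fun l => !PySem.Str.startswith l "Tasks:") = true) :
    pvReasonsScan S = pvReasonsFwd S := by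
  simp only [PySem.Str.startswith_eq, pvTL, pvRL] at h1 h2
  induction S with
  | nil => rfl
  | cons a t ih =>
    rw [List.countP_cons] at h1
    rw [List.dropWhile_cons] at h2
    by_cases ha : PySem.Chars.startswith a.toList
        ['R','e','a','s','o','n','s','_','t','a','s','k','s',':'] = true
    · have ht : t.countP (fun l => PySem.Chars.startswith l.toList
          ['R','e','a','s','o','n','s','_','t','a','s','k','s',':']) = 0 := by
        rw [ha] at h1; rw [if_pos rfl] at h1; omega
      simp only [ha, Bool.not_true] at h2
      rw [if_neg (by simp)] at h2
      simp only [List.drop_one, List.tail_cons, List.all_eq_true] at h2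
      simp only [pvReasonsScan, pvReasonsFwd, PySem.Str.startswith_eq, pvRL, if_pos ha]
      apply List.filter_congr
      intro x hx
      have hxT : PySem.Chars.startswith x.toList ['T','a','s','k','s',':'] = false := by
        simpa using h2 x hx
      have hxR : PySem.Chars.startswith x.toList
          ['R','e','a','s','o','n','s','_','t','a','s','k','s',':'] = false := by
        simpa using List.countP_eq_zero.mp ht x hx
      simp only [pvReasonKeep, PySem.Str.startswith_eq, pvTL, pvRL, hxT, hxR]
      simp
    · have ht : t.countP (fun l => PySem.Chars.startswith l.toList
          ['R','e','a','s','o','n','s','_','t','a','s','k','s',':']) ≤ 1 := by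
        simp only [ha] at h1; omega
      simp only [ha] at h2
      rw [if_pos (by simp)] at h2
      simp only [pvReasonsScan, pvReasonsFwd, PySem.Str.startswith_eq, pvRL]
      rw [if_neg ha, if_neg ha]
      exact ih ht h2

-- ===== VERDICT (by name: the statement is the Claim_ definition above) =====
theorem extract_predicate_approval_spec : Claim_equal_extract_predicate_approval := by
  intro text _ hPre
  obtain ⟨h1, h2, h3⟩ := hPre
  show _ = _
  simp only [extract_predicate_approval, extract_predicate_approval_alt, loop_eq]
  exact Prod.ext (tasks_eq _ h1) (reasons_eq _ h2 h3)
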